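-- pv_equiv track=rewrite | github.com/post-soybeen/samuraipack | plato/plot.py | AutoLine
-- ===== SOURCE A (Python) =====
-- _lines = ['_', '__', '_.', ':']
--
-- def AutoLine(n, source=None):
--     lines = []
--     m = len(_lines)
--     for i in range(n):
--         if source is None :
--             lines.append(_lines[i%m])
--         else :
--             lines.append(source)
--     return lines
-- ===== SOURCE B (Python) =====
-- _lines = ['_', '__', '_.', ':']
--
-- def AutoLine(n, source=None):
--     if source is not None:
--         return [source] * n
--     return (_lines * (n // len(_lines) + 1))[:n]
-- ===== Notes on version B (the rewrite author's own statement) =====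
-- stated objective: simpler
-- what changed: Replaced the per-element modulo-indexed append loop by a single branch on source: list repetition [source]*n, or tiling _lines (n//4+1) times and slicing to length n — no explicit loop remains.
import Mathlib
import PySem

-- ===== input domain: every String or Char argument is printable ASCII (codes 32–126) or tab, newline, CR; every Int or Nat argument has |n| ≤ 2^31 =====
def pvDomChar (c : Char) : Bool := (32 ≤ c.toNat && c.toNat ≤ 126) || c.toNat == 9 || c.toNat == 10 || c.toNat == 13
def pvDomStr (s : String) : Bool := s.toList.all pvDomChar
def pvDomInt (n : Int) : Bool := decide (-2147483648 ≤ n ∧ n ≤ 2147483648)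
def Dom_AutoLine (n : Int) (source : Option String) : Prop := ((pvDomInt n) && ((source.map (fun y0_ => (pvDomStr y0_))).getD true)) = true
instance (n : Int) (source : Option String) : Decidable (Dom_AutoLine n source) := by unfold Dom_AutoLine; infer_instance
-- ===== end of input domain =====

-- B replaces A's per-element modulo-indexed append loop by one branch on source: [source]*n, or tiling _lines (n//4+1) times and slicing to n (objective: simpler — no explicit loop remains).

-- ===== PORT A =====
-- module constant _lines
def pvLines : List String := ["_", "__", "_.", ":"]

-- the index i % m is always in range (0 ≤ i < n, m = 4), hence pyGetD with default "" is exact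
def AutoLine (n : Int) (source : Option String) : List String :=
  let m : Int := (pvLines.length : Int)
  (PySem.List.pyRange 0 n 1).foldl (fun lines i =>
    match source with
    | none => lines ++ [PySem.List.pyGetD pvLines (PySem.Int.mod i m) ""]
    | some s => lines ++ [s]) []

-- ===== PORT B =====
def AutoLine_alt (n : Int) (source : Option String) : List String :=
  match source with
  | some s => List.replicate n.toNat s       -- [source] * n  (empty for n ≤ 0)
  | none =>
      -- (_lines * (n // len(_lines) + 1))[:n]
      PySem.List.slice
        ((List.replicate (PySem.Int.floordiv n (pvLines.length : Int) + 1).toNat pvLines).flatten)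
        none (some n)

-- ===== PRECONDITION & SPEC =====
def Spec_AutoLine (n : Int) (source : Option String) (out : List String) : Prop := out = AutoLine_alt n source
instance (n : Int) (source : Option String) (out : List String) : Decidable (Spec_AutoLine n source out) := by unfold Spec_AutoLine; infer_instance

-- ===== CLAIM (what is proved, stated in full; the proofs are below) =====
def Claim_equal_AutoLine : Prop := ∀ (n : Int) (source : Option String), Dom_AutoLine n source → Spec_AutoLine n source (AutoLine n source)

-- ===== LEMMAS AND PROOFS =====

-- element k of m tiled copies of pvLines is pvLines[k % 4]
theorem getElem_flatten_replicate_pvLines (m k : Nat) (hk : k < 4 * m)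
    (h : k < ((List.replicate m pvLines).flatten).length) :
    ((List.replicate m pvLines).flatten)[k] = pvLines.getD (k % 4) "" := by
  induction m generalizing k with
  | zero => omega
  | succ m ih =>
    have he : (List.replicate (m+1) pvLines).flatten = pvLines ++ (List.replicate m pvLines).flatten := by
      rw [List.replicate_succ, List.flatten_cons]
    rw [List.getElem_of_eq he]
    rw [he] at h
    by_cases h4 : k < 4
    · rw [List.getElem_append_left (by simpa [pvLines] using h4)]
      rw [Nat.mod_eq_of_lt h4, List.getD_eq_getElem _ _ (by simp [pvLines]; omega)]
    · have hlen : pvLines.length ≤ k := by simp [pvLines]; omega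
      rw [List.getElem_append_right hlen]
      have hk' : k - pvLines.length < 4 * m := by simp [pvLines] at *; omega
      rw [ih (k - pvLines.length) hk']
      have : (k - pvLines.length) % 4 = k % 4 := by
        simp [pvLines]
        omega
      rw [this]

theorem tile_len (m : Nat) : ((List.replicate m pvLines).flatten).length = 4 * m := by
  induction m with
  | zero => simp
  | succ m ih => rw [List.replicate_succ, List.flatten_cons]; simp [pvLines] at *; omega

-- the cycled map equals tiling-and-truncating, at the Nat level
theorem cycle_eq_tile (N : Nat) :
    (List.range N).map (fun k => pvLines.getD (k % 4) "") =
    ((List.replicate (N / 4 + 1) pvLines).flatten).take N := by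
  have hlen : ((List.replicate (N / 4 + 1) pvLines).flatten).length = 4 * (N / 4 + 1) :=
    tile_len _
  have hN : N ≤ 4 * (N / 4 + 1) := by
    have := Nat.div_add_mod N 4
    have := Nat.mod_lt N (show 0 < 4 by norm_num)
    omega
  apply List.ext_getElem
  · simp [hlen]; omega
  · intro k h1 h2
    simp only [List.getElem_map, List.getElem_range, List.getElem_take]
    have hk : k < N := by simpa using h1
    exact (getElem_flatten_replicate_pvLines _ k (by omega) _).symm

theorem AutoLine_spec_aux : ∀ (n : Int) (source : Option String), Spec_AutoLine n source (AutoLine n source) := by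
  intro n source
  unfold Spec_AutoLine AutoLine AutoLine_alt
  cases source with
  | some s =>
    simp only []
    rw [PySem.List.foldl_append_singleton_eq_map, List.map_const']
    simp [PySem.List.length_pyRange_one]
  | none =>
    simp only []
    rw [PySem.List.foldl_append_singleton_eq_map]
    by_cases hn : 0 < n
    · have hcast : n = (n.toNat : Int) := by omega
      rw [hcast, PySem.List.pyRange_zero_natCast, PySem.List.slice_to_natCast]
      have hfd : PySem.Int.floordiv ((n.toNat : Int)) ((pvLines.length : Int)) = ((n.toNat / 4 : Nat) : Int) := by
        simp [pvLines]
      rw [hfd]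
      have ht : (((n.toNat / 4 : Nat) : Int) + 1).toNat = n.toNat / 4 + 1 := by omega
      rw [ht, ← cycle_eq_tile, List.map_map]
      apply List.map_congr_left
      intro k hk
      simp only [Function.comp]
      have hmod : PySem.Int.mod ((k : Int)) ((pvLines.length : Int)) = ((k % 4 : Nat) : Int) := by
        simp [pvLines]
      rw [hmod, PySem.List.pyGetD_natCast]
    · rw [PySem.List.pyRange_one_eq_nil (by omega)]
      by_cases h0 : n = 0
      · subst h0; decide
      · have hlt : PySem.Int.floordiv n ((pvLines.length : Int)) < 0 := by
          have h4 : ((pvLines.length : Nat) : Int) = 4 := by simp [pvLines]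
          rw [h4, PySem.Int.floordiv_lt_iff_lt_mul (by norm_num)]
          omega
        have h1 : (PySem.Int.floordiv n ((pvLines.length : Int)) + 1).toNat = 0 := by omega
        rw [h1]
        simp [PySem.List.slice]

-- ===== VERDICT (by name: the statement is the Claim_ definition above) =====
theorem AutoLine_spec : Claim_equal_AutoLine := fun n source _ => AutoLine_spec_aux n source
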